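-- pv_equiv track=rewrite | github.com/tuan-ld/AENLP-reproduce-results | Demo_sik.py | make_pair_by_max
-- ===== SOURCE A (Python) =====
-- def make_pair_by_max(value, ordered_tokens, entities, q_pair):
--     lefts = []
--     rights = []
--     pairs = []
--     entity_pairs =[]
--     for i in range(value+1):
--         for j in range(value+1):
--             if i != j and entitie_check(entities[j], entities[i], q_pair) == True:
--                 pairs.append((ordered_tokens[j], ordered_tokens[i]))
--                 lefts.append(j)
--                 rights.append(i)
--                 entity_pairs.append((entities[j], entities[i]))
--     return lefts, rights, pairs, entity_pairs
--
-- def entitie_check(l, r, q_pair):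
--     booa = False
--     if (l, r) in q_pair:
--         booa = True
--     return booa
-- ===== SOURCE B (Python) =====
-- def make_pair_by_max(value, ordered_tokens, entities, q_pair):
--     n = max(value + 1, 0)
--     pos = {}
--     for idx, e in enumerate(entities[:n]):
--         pos.setdefault(e, []).append(idx)
--     matches = []
--     for (l, r) in dict.fromkeys(q_pair):
--         matches += [(i, j) for i in pos.get(r, ()) for j in pos.get(l, ()) if j != i]
--     matches.sort()
--     lefts = [j for (i, j) in matches]
--     rights = [i for (i, j) in matches]
--     pairs = [(ordered_tokens[j], ordered_tokens[i]) for (i, j) in matches]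
--     entity_pairs = [(entities[j], entities[i]) for (i, j) in matches]
--     return lefts, rights, pairs, entity_pairs
-- ===== Notes on version B (the rewrite author's own statement) =====
-- stated objective: faster
-- what changed: A scans all (value+1)^2 index pairs and does a linear q_pair membership test for each; B builds an entity->indices dictionary over entities[:value+1] in one pass, walks the deduplicated q_pair list collecting matching index pairs, and sorts them lexicographically to recover A's emission order.
import Mathlib
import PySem

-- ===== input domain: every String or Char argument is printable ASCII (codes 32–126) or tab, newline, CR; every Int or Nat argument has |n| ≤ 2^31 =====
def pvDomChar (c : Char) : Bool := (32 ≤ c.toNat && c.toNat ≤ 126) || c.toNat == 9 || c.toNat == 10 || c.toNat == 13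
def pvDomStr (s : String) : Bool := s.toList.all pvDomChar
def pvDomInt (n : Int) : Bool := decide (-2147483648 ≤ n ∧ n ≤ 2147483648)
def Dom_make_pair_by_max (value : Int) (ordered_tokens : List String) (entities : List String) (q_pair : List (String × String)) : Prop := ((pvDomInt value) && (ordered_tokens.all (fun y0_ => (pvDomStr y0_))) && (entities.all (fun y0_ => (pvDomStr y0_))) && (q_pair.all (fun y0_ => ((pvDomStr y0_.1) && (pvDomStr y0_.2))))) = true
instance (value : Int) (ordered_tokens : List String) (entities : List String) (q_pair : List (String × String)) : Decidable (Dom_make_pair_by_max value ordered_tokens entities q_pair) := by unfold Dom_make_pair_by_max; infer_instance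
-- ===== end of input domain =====

-- B replaces A's quadratic double scan over all index pairs by a value→indices dictionary built in
-- one pass, a scan of the (deduplicated) q_pair list, and one lexicographic sort of the matches.

-- ===== PORT A =====
def entitie_check (l : String) (r : String) (q_pair : List (String × String)) : Bool :=
  let booa := false
  let booa := if (l, r) ∈ q_pair then true else booa
  booa

def make_pair_by_max (value : Int) (ordered_tokens : List String) (entities : List String) (q_pair : List (String × String)) : List Int × List Int × (List (String × String)) × (List (String × String)) :=
  (PySem.List.pyRange 0 (value + 1) 1).foldl (fun st i =>
    (PySem.List.pyRange 0 (value + 1) 1).foldl (fun st2 j =>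
      if i ≠ j ∧ entitie_check (PySem.List.pyGetD entities j "") (PySem.List.pyGetD entities i "") q_pair = true then
        (st2.1 ++ [j], st2.2.1 ++ [i],
         st2.2.2.1 ++ [(PySem.List.pyGetD ordered_tokens j "", PySem.List.pyGetD ordered_tokens i "")],
         st2.2.2.2 ++ [(PySem.List.pyGetD entities j "", PySem.List.pyGetD entities i "")])
      else st2) st)
    (([] : List Int), ([] : List Int), ([] : List (String × String)), ([] : List (String × String)))

-- ===== PORT B =====
def make_pair_by_max_alt (value : Int) (ordered_tokens : List String) (entities : List String) (q_pair : List (String × String)) : List Int × List Int × (List (String × String)) × (List (String × String)) :=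
  let n : Int := max (value + 1) 0
  -- pos.setdefault(e, []).append(idx) over enumerate(entities[:n])
  let pos : PySem.Dict String (List Int) :=
    (PySem.List.enumerate (PySem.List.slice entities none (some n))).foldl
      (fun d p => d.modify p.2 [] (fun v => v ++ [p.1])) PySem.Dict.empty
  let mts : List (Int × Int) :=
    (PySem.List.dedup q_pair).foldl (fun acc lr =>
      acc ++ (pos.getD lr.2 []).flatMap (fun i =>
        ((pos.getD lr.1 []).filter (fun j => j ≠ i)).map (fun j => (i, j)))) []
  let ms := PySem.List.sorted mts (fun m => toLex m)
  (ms.map (fun m => m.2), ms.map (fun m => m.1),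
   ms.map (fun m => (PySem.List.pyGetD ordered_tokens m.2 "", PySem.List.pyGetD ordered_tokens m.1 "")),
   ms.map (fun m => (PySem.List.pyGetD entities m.2 "", PySem.List.pyGetD entities m.1 "")))

-- ===== PRECONDITION & SPEC =====
-- Exactly the inputs on which the Python A returns normally: for value ≥ 1 every index 0..value is
-- read from entities (IndexError otherwise), and ordered_tokens is indexed exactly at matched pairs.
def Pre_make_pair_by_max (value : Int) (ordered_tokens : List String) (entities : List String) (q_pair : List (String × String)) : Prop :=
  value ≤ 0 ∨ (value < (entities.length : Int) ∧
    ∀ i ∈ List.range (value.toNat + 1), ∀ j ∈ List.range (value.toNat + 1), i ≠ j →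
      (entities.getD j "", entities.getD i "") ∈ q_pair → j < ordered_tokens.length ∧ i < ordered_tokens.length)
instance (value : Int) (ordered_tokens : List String) (entities : List String) (q_pair : List (String × String)) : Decidable (Pre_make_pair_by_max value ordered_tokens entities q_pair) := by unfold Pre_make_pair_by_max; infer_instance

def pvWitness_make_pair_by_max : Int × List String × List String × (List (String × String)) :=
  (1, ["a", "b"], ["x", "y"], [("y", "x")])

def Spec_make_pair_by_max (value : Int) (ordered_tokens : List String) (entities : List String) (q_pair : List (String × String)) (out : List Int × List Int × (List (String × String)) × (List (String × String))) : Prop := out = make_pair_by_max_alt value ordered_tokens entities q_pair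
instance (value : Int) (ordered_tokens : List String) (entities : List String) (q_pair : List (String × String)) (out : List Int × List Int × (List (String × String)) × (List (String × String))) : Decidable (Spec_make_pair_by_max value ordered_tokens entities q_pair out) := by unfold Spec_make_pair_by_max; infer_instance

-- ===== CLAIM (what is proved, stated in full; the proofs are below) =====
def Claim_equal_make_pair_by_max : Prop := ∀ (value : Int) (ordered_tokens : List String) (entities : List String) (q_pair : List (String × String)), Dom_make_pair_by_max value ordered_tokens entities q_pair → Pre_make_pair_by_max value ordered_tokens entities q_pair → Spec_make_pair_by_max value ordered_tokens entities q_pair (make_pair_by_max value ordered_tokens entities q_pair)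

-- ===== LEMMAS AND PROOFS =====

-- the list of matched (i, j) index pairs in A's emission order (i outer ascending, j inner ascending)
def pvL (value : Int) (entities : List String) (q_pair : List (String × String)) : List (Int × Int) :=
  (PySem.List.pyRange 0 (value + 1) 1).flatMap (fun i =>
    ((PySem.List.pyRange 0 (value + 1) 1).filter (fun j =>
      decide (i ≠ j ∧ entitie_check (PySem.List.pyGetD entities j "") (PySem.List.pyGetD entities i "") q_pair = true))).map (fun j => (i, j)))

-- B's enumerated prefix with Int indices, its per-entity index list, and its match list
def pvE (value : Int) (entities : List String) : List (Int × String) :=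
  PySem.List.enumerate (PySem.List.slice entities none (some (max (value + 1) 0)))

def pvP (value : Int) (entities : List String) (e : String) : List Int :=
  ((pvE value entities).filter (fun q => q.2 == e)).map (fun q => q.1)

def pvMts (value : Int) (entities : List String) (q_pair : List (String × String)) : List (Int × Int) :=
  (PySem.List.dedup q_pair).flatMap (fun lr =>
    (pvP value entities lr.2).flatMap (fun i =>
      ((pvP value entities lr.1).filter (fun j => j ≠ i)).map (fun j => (i, j))))

lemma quadFold {p : Int → Prop} [DecidablePred p] (f1 f2 : Int → Int) (f3 f4 : Int → String × String) :
    ∀ (R : List Int) (st : List Int × List Int × List (String × String) × List (String × String)),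
    R.foldl (fun s j => if p j then (s.1 ++ [f1 j], s.2.1 ++ [f2 j], s.2.2.1 ++ [f3 j], s.2.2.2 ++ [f4 j]) else s) st
    = (st.1 ++ (R.filter (fun j => decide (p j))).map f1,
       st.2.1 ++ (R.filter (fun j => decide (p j))).map f2,
       st.2.2.1 ++ (R.filter (fun j => decide (p j))).map f3,
       st.2.2.2 ++ (R.filter (fun j => decide (p j))).map f4) := by
  intro R
  induction R with
  | nil => intro st; simp
  | cons x t ih =>
    intro st
    by_cases hx : p x
    · simp [hx, ih]
    · simp [hx, ih]

lemma quadFoldApp (g1 g2 : Int → List Int) (g3 g4 : Int → List (String × String)) :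
    ∀ (R : List Int) (st : List Int × List Int × List (String × String) × List (String × String)),
    R.foldl (fun s i => (s.1 ++ g1 i, s.2.1 ++ g2 i, s.2.2.1 ++ g3 i, s.2.2.2 ++ g4 i)) st
    = (st.1 ++ R.flatMap g1, st.2.1 ++ R.flatMap g2, st.2.2.1 ++ R.flatMap g3, st.2.2.2 ++ R.flatMap g4) := by
  intro R
  induction R with
  | nil => intro st; simp
  | cons x t ih => intro st; simp [ih]

lemma A_eq (value : Int) (ordered_tokens entities : List String) (q_pair : List (String × String)) :
    make_pair_by_max value ordered_tokens entities q_pair =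
    ((pvL value entities q_pair).map (fun m => m.2),
     (pvL value entities q_pair).map (fun m => m.1),
     (pvL value entities q_pair).map (fun m => (PySem.List.pyGetD ordered_tokens m.2 "", PySem.List.pyGetD ordered_tokens m.1 "")),
     (pvL value entities q_pair).map (fun m => (PySem.List.pyGetD entities m.2 "", PySem.List.pyGetD entities m.1 ""))) := by
  unfold make_pair_by_max pvL
  simp only [quadFold, quadFoldApp, List.map_flatMap, List.map_map]
  simp [Function.comp_def]

lemma pos_getD (value : Int) (entities : List String) (e : String) :
    ((PySem.List.enumerate (PySem.List.slice entities none (some (max (value + 1) 0)))).foldl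
      (fun d p => d.modify p.2 [] (fun v => v ++ [p.1])) PySem.Dict.empty).getD e []
    = pvP value entities e := by
  unfold pvP pvE
  have h : List.foldl (fun (d : PySem.Dict String (List Int)) (p : Int × String) => d.modify p.2 [] (fun v => v ++ [p.1])) PySem.Dict.empty (PySem.List.enumerate (PySem.List.slice entities none (some (max (value + 1) 0))))
      = List.foldl (fun (d : PySem.Dict String (List Int)) (p : String × Int) => d.modify p.1 [] (fun v => v ++ [p.2])) PySem.Dict.empty ((PySem.List.enumerate (PySem.List.slice entities none (some (max (value + 1) 0)))).map (fun q => (q.2, q.1))) :=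
    (List.foldl_map (f := fun (q : Int × String) => (q.2, q.1))
      (g := fun (d : PySem.Dict String (List Int)) (p : String × Int) => d.modify p.1 [] (fun v => v ++ [p.2]))
      (l := PySem.List.enumerate (PySem.List.slice entities none (some (max (value + 1) 0))))
      (init := PySem.Dict.empty)).symm
  rw [h, PySem.Dict.getD_foldl_modify_append]
  simp [List.filter_map, List.map_map, Function.comp_def, PySem.Dict.empty, PySem.Dict.getD, PySem.Dict.get?]

lemma B_eq (value : Int) (ordered_tokens entities : List String) (q_pair : List (String × String)) :
    make_pair_by_max_alt value ordered_tokens entities q_pair =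
    (((PySem.List.sorted (pvMts value entities q_pair) (fun m => toLex m))).map (fun m => m.2),
     ((PySem.List.sorted (pvMts value entities q_pair) (fun m => toLex m))).map (fun m => m.1),
     ((PySem.List.sorted (pvMts value entities q_pair) (fun m => toLex m))).map (fun m => (PySem.List.pyGetD ordered_tokens m.2 "", PySem.List.pyGetD ordered_tokens m.1 "")),
     ((PySem.List.sorted (pvMts value entities q_pair) (fun m => toLex m))).map (fun m => (PySem.List.pyGetD entities m.2 "", PySem.List.pyGetD entities m.1 ""))) := by
  unfold make_pair_by_max_alt pvMts
  simp only [pos_getD, PySem.List.foldl_append_eq_flatMap, List.nil_append]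



lemma mem_pvP (value : Int) (entities : List String) (e : String) (i : Int) :
    i ∈ pvP value entities e ↔ ∃ k : Nat, k < (max (value + 1) 0).toNat ∧ entities[k]? = some e ∧ i = (k : Int) := by
  unfold pvP pvE
  rw [show PySem.List.slice entities none (some (max (value + 1) 0)) = entities.take ((max (value + 1) 0).toNat) from PySem.List.slice_to entities (le_max_right _ _)]
  simp only [List.mem_map, List.mem_filter, PySem.List.mem_enumerate_iff, beq_iff_eq]
  constructor
  · rintro ⟨q, ⟨⟨k, hk, rfl⟩, h1⟩, rfl⟩
    have hk2 : k < (max (value + 1) 0).toNat := by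
      have := hk; rw [List.length_take] at this; omega
    have hk3 : k < entities.length := by
      have := hk; rw [List.length_take] at this; omega
    refine ⟨k, hk2, ?_, by simp⟩
    rw [List.getElem?_eq_getElem hk3]
    rw [List.getElem_take] at h1
    simpa using congrArg some h1
  · rintro ⟨k, hk, he, rfl⟩
    have hk3 : k < entities.length := (List.getElem?_eq_some_iff.mp he).1
    have hkp : k < (entities.take ((max (value + 1) 0).toNat)).length := by
      rw [List.length_take]; omega
    refine ⟨((k : Int), e), ⟨⟨k, hkp, ?_⟩, rfl⟩, by simp⟩
    have : (entities.take ((max (value + 1) 0).toNat))[k] = e := by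
      rw [List.getElem_take]
      exact Option.some.inj ((List.getElem?_eq_getElem hk3) ▸ he)
    simp [this]

lemma nodup_pvP (value : Int) (entities : List String) (e : String) : (pvP value entities e).Nodup := by
  have hsub : List.Sublist (((pvE value entities).filter (fun q => q.2 == e)).map (fun q => q.1))
      ((pvE value entities).map (fun q => q.1)) := List.filter_sublist.map _
  apply hsub.nodup
  refine (List.pairwise_map.mpr ?_).imp (fun {a b} (h : a < b) => ne_of_lt h)
  exact PySem.List.pairwise_lt_enumerate _ _

lemma mem_pvL (value : Int) (entities : List String) (q_pair : List (String × String)) (i j : Int) :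
    (i, j) ∈ pvL value entities q_pair ↔
      0 ≤ i ∧ i < value + 1 ∧ 0 ≤ j ∧ j < value + 1 ∧ i ≠ j ∧
      (PySem.List.pyGetD entities j "", PySem.List.pyGetD entities i "") ∈ q_pair := by
  unfold pvL
  simp only [List.mem_flatMap, List.mem_map, List.mem_filter, PySem.List.mem_pyRange_one,
    decide_eq_true_eq, entitie_check]
  constructor
  · rintro ⟨a, ⟨ha0, ha1⟩, b, ⟨⟨hb0, hb1⟩, hne, hchk⟩, heq⟩
    cases heq
    refine ⟨ha0, ha1, hb0, hb1, hne, ?_⟩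
    simpa using hchk
  · rintro ⟨hi0, hi1, hj0, hj1, hne, hq⟩
    exact ⟨i, ⟨hi0, hi1⟩, j, ⟨⟨hj0, hj1⟩, hne, by simpa using hq⟩, rfl⟩

lemma pairwise_pvL (value : Int) (entities : List String) (q_pair : List (String × String)) :
    (pvL value entities q_pair).Pairwise (fun a b => toLex a < toLex b) := by
  unfold pvL
  rw [List.pairwise_flatMap]
  constructor
  · intro a _
    apply List.Pairwise.map
    · intro x y hxy
      exact Prod.Lex.toLex_lt_toLex.mpr (Or.inr ⟨rfl, hxy⟩)
    · exact (PySem.List.pairwise_lt_pyRange_one 0 (value+1)).filter _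
  · apply (PySem.List.pairwise_lt_pyRange_one 0 (value+1)).imp ?_
    intro a b hab
    rintro x hx y hy
    obtain ⟨jx, -, rfl⟩ := List.mem_map.mp hx
    obtain ⟨jy, -, rfl⟩ := List.mem_map.mp hy
    exact Prod.Lex.toLex_lt_toLex.mpr (Or.inl hab)

lemma nodup_pvL (value : Int) (entities : List String) (q_pair : List (String × String)) :
    (pvL value entities q_pair).Nodup :=
  (pairwise_pvL value entities q_pair).imp (fun h => by rintro rfl; exact lt_irrefl _ h)

lemma mem_g (value : Int) (entities : List String) (lr : String × String) (x : Int × Int) :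
    x ∈ (pvP value entities lr.2).flatMap (fun i =>
        ((pvP value entities lr.1).filter (fun j => j ≠ i)).map (fun j => (i, j))) ↔
      x.1 ∈ pvP value entities lr.2 ∧ x.2 ∈ pvP value entities lr.1 ∧ x.2 ≠ x.1 := by
  simp only [List.mem_flatMap, List.mem_map, List.mem_filter, decide_eq_true_eq]
  constructor
  · rintro ⟨i, hi, j, ⟨hj, hne⟩, rfl⟩
    exact ⟨hi, hj, hne⟩
  · rintro ⟨h1, h2, hne⟩
    exact ⟨x.1, h1, x.2, ⟨h2, hne⟩, rfl⟩

lemma lr_of_mem_pvP (value : Int) (entities : List String) (e : String) (i : Int)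
    (h : i ∈ pvP value entities e) : 0 ≤ i ∧ i < value + 1 ∧ entities[i.toNat]? = some e := by
  obtain ⟨k, hk, he, rfl⟩ := (mem_pvP value entities e i).mp h
  refine ⟨Int.natCast_nonneg k, by omega, by simpa using he⟩

lemma nodup_pvMts (value : Int) (entities : List String) (q_pair : List (String × String)) :
    (pvMts value entities q_pair).Nodup := by
  unfold pvMts
  rw [List.nodup_flatMap]
  constructor
  · intro lr _
    rw [List.nodup_flatMap]
    constructor
    · intro i _
      exact ((nodup_pvP value entities lr.1).filter _).map (fun a b hab => by simpa using hab)
    · apply (nodup_pvP value entities lr.2).imp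
      intro a b hab x hxa hxb
      obtain ⟨ja, -, rfl⟩ := List.mem_map.mp hxa
      obtain ⟨jb, -, heq⟩ := List.mem_map.mp hxb
      exact hab (congrArg Prod.fst heq).symm
  · apply (PySem.List.nodup_dedup q_pair).imp
    intro lr lr' hne x hx hx'
    obtain ⟨h1, h2, -⟩ := (mem_g value entities lr x).mp hx
    obtain ⟨h1', h2', -⟩ := (mem_g value entities lr' x).mp hx'
    obtain ⟨-, -, he2⟩ := lr_of_mem_pvP value entities lr.2 x.1 h1
    obtain ⟨-, -, he2'⟩ := lr_of_mem_pvP value entities lr'.2 x.1 h1'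
    obtain ⟨-, -, he1⟩ := lr_of_mem_pvP value entities lr.1 x.2 h2
    obtain ⟨-, -, he1'⟩ := lr_of_mem_pvP value entities lr'.1 x.2 h2'
    apply hne
    have e2 : lr.2 = lr'.2 := Option.some.inj (he2 ▸ he2')
    have e1 : lr.1 = lr'.1 := Option.some.inj (he1 ▸ he1')
    exact Prod.ext e1 e2

lemma mem_pvMts (value : Int) (entities : List String) (q_pair : List (String × String))
    (hv : 0 ≤ value) (hpre : value = 0 ∨ value < (entities.length : Int)) (i j : Int) :
    (i, j) ∈ pvMts value entities q_pair ↔ (i, j) ∈ pvL value entities q_pair := by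
  rw [mem_pvL]
  unfold pvMts
  rw [List.mem_flatMap]
  constructor
  · rintro ⟨lr, hlr, hg⟩
    obtain ⟨h1, h2, hne⟩ := (mem_g value entities lr (i, j)).mp hg
    obtain ⟨hi0, hi1, hei⟩ := lr_of_mem_pvP value entities lr.2 i h1
    obtain ⟨hj0, hj1, hej⟩ := lr_of_mem_pvP value entities lr.1 j h2
    have hgi : PySem.List.pyGetD entities i "" = lr.2 := by
      rw [PySem.List.pyGetD_of_nonneg entities "" hi0, List.getD_eq_getElem?_getD, hei]; rfl
    have hgj : PySem.List.pyGetD entities j "" = lr.1 := by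
      rw [PySem.List.pyGetD_of_nonneg entities "" hj0, List.getD_eq_getElem?_getD, hej]; rfl
    refine ⟨hi0, hi1, hj0, hj1, fun h => hne h.symm, ?_⟩
    rw [hgi, hgj]
    exact (PySem.List.mem_dedup q_pair lr).mp hlr
  · rintro ⟨hi0, hi1, hj0, hj1, hne, hq⟩
    rcases hpre with h0 | hlen
    · omega
    · have hiN : i.toNat < entities.length := by omega
      have hjN : j.toNat < entities.length := by omega
      have hgi : PySem.List.pyGetD entities i "" = entities[i.toNat] :=
        PySem.List.pyGetD_eq_getElem entities "" hi0 (by omega)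
      have hgj : PySem.List.pyGetD entities j "" = entities[j.toNat] :=
        PySem.List.pyGetD_eq_getElem entities "" hj0 (by omega)
      refine ⟨(PySem.List.pyGetD entities j "", PySem.List.pyGetD entities i ""),
        (PySem.List.mem_dedup q_pair _).mpr hq, (mem_g value entities _ (i, j)).mpr ⟨?_, ?_, fun h => hne h.symm⟩⟩
      · exact (mem_pvP value entities _ i).mpr ⟨i.toNat, by omega,
          by rw [List.getElem?_eq_getElem hiN, hgi], (Int.toNat_of_nonneg hi0).symm⟩
      · exact (mem_pvP value entities _ j).mpr ⟨j.toNat, by omega,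
          by rw [List.getElem?_eq_getElem hjN, hgj], (Int.toNat_of_nonneg hj0).symm⟩

lemma sorted_mts (value : Int) (entities : List String) (q_pair : List (String × String))
    (hpre : value ≤ 0 ∨ value < (entities.length : Int)) :
    PySem.List.sorted (pvMts value entities q_pair) (fun m => toLex m) = pvL value entities q_pair := by
  by_cases hle : value + 1 ≤ 0
  · have hM : pvMts value entities q_pair = [] := by
      rw [List.eq_nil_iff_forall_not_mem]
      intro x hx
      obtain ⟨lr, -, hg⟩ := List.mem_flatMap.mp (by unfold pvMts at hx; exact hx)
      obtain ⟨h1, -, -⟩ := (mem_g value entities lr x).mp hg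
      obtain ⟨h10, h11, -⟩ := lr_of_mem_pvP value entities lr.2 x.1 h1
      omega
    have hL : pvL value entities q_pair = [] := by
      unfold pvL
      rw [PySem.List.pyRange_one_eq_nil hle]
      rfl
    rw [hM, hL]
    exact (PySem.List.sorted_eq_nil_iff _ _ _).mpr rfl
  · have hv : 0 ≤ value := by omega
    have hpre' : value = 0 ∨ value < (entities.length : Int) := by
      rcases hpre with h | h
      · exact Or.inl (by omega)
      · exact Or.inr h
    apply PySem.List.sorted_eq_of_perm_of_pairwise_lt
    · refine (List.perm_ext_iff_of_nodup (nodup_pvL value entities q_pair)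
        (nodup_pvMts value entities q_pair)).mpr ?_
      rintro ⟨i, j⟩
      exact (mem_pvMts value entities q_pair hv hpre' i j).symm
    · exact pairwise_pvL value entities q_pair

-- ===== VERDICT (by name: the statement is the Claim_ definition above) =====
theorem make_pair_by_max_spec : Claim_equal_make_pair_by_max := by
  intro value ordered_tokens entities q_pair _ hpre
  unfold Spec_make_pair_by_max
  have hpre' : value ≤ 0 ∨ value < (entities.length : Int) := by
    rcases hpre with h | ⟨h, -⟩
    · exact Or.inl h
    · exact Or.inr h
  rw [A_eq, B_eq, sorted_mts value entities q_pair hpre']
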